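-- pv_equiv track=rewrite | github.com/pypi-data/pypi-mirror-401 | packages/klaude-code/klaude_code-2.10.0.tar.gz/klaude_code-2.10.0/src/klaude_code/core/bash_mode.py | _format_inline_code
-- ===== SOURCE A (Python) =====
-- def _format_inline_code(text: str) -> str:
--     if not text:
--         return "``"
--     max_run = 0
--     run = 0
--     for ch in text:
--         if ch == "`":
--             run += 1
--             max_run = max(max_run, run)
--         else:
--             run = 0
--     fence = "`" * (max_run + 1)
--     return f"{fence}{text}{fence}"
-- ===== SOURCE B (Python) =====
-- def _format_inline_code(text: str) -> str:
--     k = 0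
--     while "`" * (k + 1) in text:
--         k += 1
--     fence = "`" * (k + 1)
--     return f"{fence}{text}{fence}"
-- ===== Notes on version B (the rewrite author's own statement) =====
-- stated objective: simpler
-- what changed: Replaces A's character-by-character running-max run counter with an iterated substring-membership search: grow k while '`'*(k+1) is still a substring of text, then fence with '`'*(k+1); the empty-text guard disappears.
import Mathlib
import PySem

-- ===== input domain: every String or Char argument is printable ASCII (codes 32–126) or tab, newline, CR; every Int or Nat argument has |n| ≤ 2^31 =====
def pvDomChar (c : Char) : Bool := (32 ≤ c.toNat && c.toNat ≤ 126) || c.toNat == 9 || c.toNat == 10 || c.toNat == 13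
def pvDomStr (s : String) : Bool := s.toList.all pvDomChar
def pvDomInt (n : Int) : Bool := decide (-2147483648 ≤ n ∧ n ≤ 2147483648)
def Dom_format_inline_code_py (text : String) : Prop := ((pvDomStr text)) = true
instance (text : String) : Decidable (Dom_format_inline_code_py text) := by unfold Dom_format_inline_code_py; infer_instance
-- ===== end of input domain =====

-- B replaces A's running-max backtick-run counter by an iterated substring-membership
-- search (simpler: shorter, no running state, no empty-text guard). Same return value.

-- ===== PORT A =====
-- literal port of A: empty guard, then one pass keeping (max_run, run), fence = '`'*(max_run+1)
def format_inline_code_py (text : String) : String :=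
  let cs := text.toList
  if cs = [] then "``"
  else
    let p := cs.foldl (fun (st : Nat × Nat) ch =>
      if ch = '`' then (max st.1 (st.2 + 1), st.2 + 1) else (st.1, 0)) (0, 0)
    let fence := List.replicate (p.1 + 1) '`'
    String.ofList (fence ++ cs ++ fence)

-- ===== PORT B =====
-- while '`'*(k+1) in text: k += 1   ('in' on str = PySem.Chars.isIn)
def pvBLoop (cs : List Char) (k : Nat) : Nat :=
  if h : PySem.Chars.isIn (List.replicate (k + 1) '`') cs = true then
    pvBLoop cs (k + 1)
  else k
termination_by cs.length - k
decreasing_by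
  have hinf := (PySem.Chars.isIn_iff_infix _ _).mp h
  have hle := hinf.length_le
  simp [List.length_replicate] at hle
  omega

def format_inline_code_py_alt (text : String) : String :=
  let cs := text.toList
  let k := pvBLoop cs 0
  let fence := List.replicate (k + 1) '`'
  String.ofList (fence ++ cs ++ fence)

-- ===== PRECONDITION & SPEC =====
def Spec_format_inline_code_py (text : String) (out : String) : Prop := out = format_inline_code_py_alt text
instance (text : String) (out : String) : Decidable (Spec_format_inline_code_py text out) := by unfold Spec_format_inline_code_py; infer_instance

-- ===== CLAIM (what is proved, stated in full; the proofs are below) =====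
def Claim_equal_format_inline_code_py : Prop := ∀ (text : String), Dom_format_inline_code_py text → Spec_format_inline_code_py text (format_inline_code_py text)

-- ===== LEMMAS AND PROOFS =====

-- proof-side characterisation: pvF r cs = longest backtick run of cs, given a pending
-- run of length r immediately before cs (counted only once extended into cs)
def pvF : Nat → List Char → Nat
  | _, [] => 0
  | r, c :: cs => if c = '`' then max (r + 1) (pvF (r + 1) cs) else pvF 0 cs

theorem pvF_tick (r : Nat) (cs : List Char) :
    pvF r ('`' :: cs) = max (r + 1) (pvF (r + 1) cs) := by simp [pvF]

theorem pvF_other {c : Char} (hc : ¬ c = '`') (r : Nat) (cs : List Char) :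
    pvF r (c :: cs) = pvF 0 cs := by simp [pvF, hc]

theorem pvF_mono : ∀ (cs : List Char) (r r' : Nat), r ≤ r' → pvF r cs ≤ pvF r' cs := by
  intro cs
  induction cs with
  | nil => intro r r' _; simp [pvF]
  | cons c cs ih =>
    intro r r' h
    by_cases hc : c = '`'
    · subst hc
      rw [pvF_tick, pvF_tick]
      have := ih (r + 1) (r' + 1) (by omega)
      omega
    · rw [pvF_other hc, pvF_other hc]

theorem pvF_prepend : ∀ (s u : List Char) (r : Nat), pvF 0 u ≤ pvF r (s ++ u) := by
  intro s
  induction s with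
  | nil => intro u r; exact pvF_mono u 0 r (Nat.zero_le r)
  | cons c s ih =>
    intro u r
    rw [List.cons_append]
    by_cases hc : c = '`'
    · subst hc
      rw [pvF_tick]
      have := ih u (r + 1)
      omega
    · rw [pvF_other hc]
      exact ih u 0

theorem pvF_repl_ge : ∀ (n : Nat) (t : List Char) (r : Nat), 1 ≤ n →
    r + n ≤ pvF r (List.replicate n '`' ++ t) := by
  intro n
  induction n with
  | zero => intro t r h; omega
  | succ m ih =>
    intro t r _
    rw [List.replicate_succ, List.cons_append, pvF_tick]
    by_cases hm : 1 ≤ m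
    · have := ih t (r + 1) hm
      omega
    · have hm0 : m = 0 := by omega
      subst hm0
      omega

theorem pv_infix_le {cs : List Char} {n : Nat}
    (h : List.replicate n '`' <:+: cs) : n ≤ pvF 0 cs := by
  rcases Nat.eq_zero_or_pos n with hn | hn
  · simp [hn]
  · rcases h with ⟨s, t, hst⟩
    have h1 : pvF 0 (List.replicate n '`' ++ t) ≤ pvF 0 cs := by
      rw [← hst, List.append_assoc]
      exact pvF_prepend s (List.replicate n '`' ++ t) 0
    have h2 := pvF_repl_ge n t 0 hn
    omega

theorem pv_repl_infix : ∀ (cs : List Char) (r : Nat),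
    List.replicate (pvF r cs) '`' <:+: (List.replicate r '`' ++ cs) := by
  intro cs
  induction cs with
  | nil => intro r; simp [pvF]
  | cons c cs ih =>
    intro r
    by_cases hc : c = '`'
    · subst hc
      rw [pvF_tick]
      have hsplit : List.replicate r '`' ++ '`' :: cs = List.replicate (r + 1) '`' ++ cs := by
        simp [List.replicate_succ']
      rw [hsplit]
      rcases Nat.le_total (pvF (r + 1) cs) (r + 1) with hle | hle
      · rw [Nat.max_eq_left hle]
        exact (List.prefix_append _ _).isInfix
      · rw [Nat.max_eq_right hle]
        exact ih (r + 1)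
    · rw [pvF_other hc]
      have h0 := ih 0
      simp only [List.replicate_zero, List.nil_append] at h0
      exact h0.trans ((List.suffix_cons c cs).isInfix.trans
        (List.suffix_append (List.replicate r '`') (c :: cs)).isInfix)

theorem pv_le_infix {cs : List Char} {n : Nat} (h : n ≤ pvF 0 cs) :
    List.replicate n '`' <:+: cs := by
  have hbig := pv_repl_infix cs 0
  simp only [List.replicate_zero, List.nil_append] at hbig
  have hpre : List.replicate n '`' <+: List.replicate (pvF 0 cs) '`' := by
    refine ⟨List.replicate (pvF 0 cs - n) '`', ?_⟩
    rw [← List.replicate_add]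
    congr 1
    omega
  exact hpre.isInfix.trans hbig

theorem pvBLoop_eq (cs : List Char) : ∀ (d k : Nat), pvF 0 cs - k = d → k ≤ pvF 0 cs →
    pvBLoop cs k = pvF 0 cs := by
  intro d
  induction d with
  | zero =>
    intro k hd hk
    have hkeq : k = pvF 0 cs := by omega
    have hfalse : PySem.Chars.isIn (List.replicate (k + 1) '`') cs = false := by
      by_contra hne
      simp only [Bool.not_eq_false] at hne
      have := pv_infix_le ((PySem.Chars.isIn_iff_infix _ _).mp hne)
      omega
    subst hkeq
    rw [pvBLoop]
    simp [hfalse]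
  | succ m ih =>
    intro k hd hk
    have htrue : PySem.Chars.isIn (List.replicate (k + 1) '`') cs = true := by
      rw [PySem.Chars.isIn_iff_infix]
      exact pv_le_infix (by omega)
    rw [pvBLoop]
    simp only [htrue, dite_true]
    exact ih (k + 1) (by omega) (by omega)

theorem pv_foldl_eq : ∀ (cs : List Char) (m r : Nat),
    (cs.foldl (fun (st : Nat × Nat) ch =>
      if ch = '`' then (max st.1 (st.2 + 1), st.2 + 1) else (st.1, 0)) (m, r)).1
      = max m (pvF r cs) := by
  intro cs
  induction cs with
  | nil => intro m r; simp [pvF]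
  | cons c cs ih =>
    intro m r
    rw [List.foldl_cons]
    by_cases hc : c = '`'
    · subst hc
      rw [if_pos rfl, ih, pvF_tick]
      simp only []
      omega
    · rw [if_neg hc, ih, pvF_other hc]

-- ===== VERDICT (by name: the statement is the Claim_ definition above) =====
theorem format_inline_code_py_spec : Claim_equal_format_inline_code_py := by
  unfold Claim_equal_format_inline_code_py
  intro text _
  unfold Spec_format_inline_code_py format_inline_code_py format_inline_code_py_alt
  by_cases hnil : text.toList = []
  · have hF : PySem.Chars.isIn ['`'] ([] : List Char) = false := by decide
    have hb : pvBLoop ([] : List Char) 0 = 0 := by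
      rw [pvBLoop]; simp [hF]
    simp only [hnil, hb]
    decide
  · have hB : pvBLoop text.toList 0 = pvF 0 text.toList :=
      pvBLoop_eq text.toList (pvF 0 text.toList) 0 (by omega) (Nat.zero_le _)
    simp only [if_neg hnil, hB, pv_foldl_eq, Nat.zero_max]
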